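-- pv_equiv track=rewrite | github.com/wikiHK/junyilou.github.io | previous/Base62_Pythonista.py | base62_encode
-- ===== SOURCE A (Python) =====
-- alphabet = "0123456789abcdefghijklmnopqrstuvwxyzABCDEFGHIJKLMNOPQRSTUVWXYZ"
--
-- def base62_encode(num):
-- 	arr = []; base = 62
-- 	while num:
-- 		rem = num % base
-- 		num = num // base
-- 		arr.append(alphabet[rem])
-- 	arr.reverse()
-- 	return arr
-- ===== SOURCE B (Python) =====
-- alphabet = "0123456789abcdefghijklmnopqrstuvwxyzABCDEFGHIJKLMNOPQRSTUVWXYZ"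
--
-- def base62_encode(num):
--     if num <= 0:
--         return []
--     p = 1
--     while p * 62 <= num:
--         p *= 62
--     out = []
--     while p:
--         out.append(alphabet[(num // p) % 62])
--         p //= 62
--     return out
-- ===== Notes on version B (the rewrite author's own statement) =====
-- stated objective: alternative
-- what changed: Replaces A's least-significant-first append-then-reverse loop with a power-of-62 scan: B first finds the highest power of 62 not exceeding num, then emits digits most-significant-first by dividing by descending powers, so no reverse and no digit list is built backwards (B returns [] for num <= 0, where A's loop never terminates on negatives).
import Mathlib
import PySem

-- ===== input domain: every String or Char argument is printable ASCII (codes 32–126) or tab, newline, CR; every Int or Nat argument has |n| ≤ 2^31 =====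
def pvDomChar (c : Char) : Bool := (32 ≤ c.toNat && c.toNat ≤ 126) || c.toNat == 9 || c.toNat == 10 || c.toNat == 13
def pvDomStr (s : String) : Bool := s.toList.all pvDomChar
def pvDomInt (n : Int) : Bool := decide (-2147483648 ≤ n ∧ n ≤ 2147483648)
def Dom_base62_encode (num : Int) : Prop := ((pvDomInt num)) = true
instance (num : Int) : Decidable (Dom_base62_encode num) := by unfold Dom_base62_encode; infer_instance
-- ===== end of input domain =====

-- B scans descending powers of 62 and emits digits most-significant-first (no reverse); not faster, an alternative decomposition.

def pvAlphabet : String := "0123456789abcdefghijklmnopqrstuvwxyzABCDEFGHIJKLMNOPQRSTUVWXYZ"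

def pvDigit (r : Int) : String :=
  ((PySem.Str.pyGet? pvAlphabet r).map (fun c => String.ofList [c])).getD ""

-- ===== PORT A =====
-- A's while loop; the guard '0 < num' (instead of Python's 'num ≠ 0') is a totality guard only:
-- under Pre_ (0 ≤ num) the two conditions coincide, and on negatives A's loop never terminates.
def base62_encode_loop (num : Int) (arr : List String) : List String :=
  if h : 0 < num then
    base62_encode_loop (PySem.Int.floordiv num 62)
      (arr ++ [pvDigit (PySem.Int.mod num 62)])
  else arr
termination_by num.toNat
decreasing_by
  have : PySem.Int.floordiv num 62 = num / 62 := PySem.Int.floordiv_eq_ediv_of_pos (by omega)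
  rw [this]; omega

def base62_encode (num : Int) : List String :=
  (base62_encode_loop num []).reverse

-- ===== PORT B =====
-- B's first loop: grow p by factors of 62 while p * 62 ≤ num.  The '0 < p' conjunct is a
-- totality guard only (p starts at 1 and only ever gets multiplied by 62).
def pvPowLoop (num p : Int) : Int :=
  if h : 0 < p ∧ p * 62 ≤ num then pvPowLoop num (p * 62) else p
termination_by (num - p).toNat
decreasing_by omega

-- B's second loop: emit alphabet[(num // p) % 62] for p, p // 62, …, 1.  The guard '0 < p'
-- (Python: 'while p', with p never negative) is a totality guard only.
def pvEmitLoop (num p : Int) (out : List String) : List String :=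
  if h : 0 < p then
    pvEmitLoop num (PySem.Int.floordiv p 62)
      (out ++ [pvDigit (PySem.Int.mod (PySem.Int.floordiv num p) 62)])
  else out
termination_by p.toNat
decreasing_by
  have : PySem.Int.floordiv p 62 = p / 62 := PySem.Int.floordiv_eq_ediv_of_pos (by omega)
  rw [this]; omega

def base62_encode_alt (num : Int) : List String :=
  if num ≤ 0 then []
  else pvEmitLoop num (pvPowLoop num 1) []

-- ===== PRECONDITION & SPEC =====
-- Pre_ excludes negative num, on which Python A's while loop never terminates (no value is returned).
def Pre_base62_encode (num : Int) : Prop := 0 ≤ num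
instance (num : Int) : Decidable (Pre_base62_encode num) := by unfold Pre_base62_encode; infer_instance
def pvWitness_base62_encode : Int := (123456)

def Spec_base62_encode (num : Int) (out : List String) : Prop := out = base62_encode_alt num
instance (num : Int) (out : List String) : Decidable (Spec_base62_encode num out) := by unfold Spec_base62_encode; infer_instance

-- ===== CLAIM (what is proved, stated in full; the proofs are below) =====
def Claim_equal_base62_encode : Prop := ∀ (num : Int), Dom_base62_encode num → Pre_base62_encode num → Spec_base62_encode num (base62_encode num)

-- ===== LEMMAS AND PROOFS =====

-- canonical most-significant-first recursion; both ports are proved equal to it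
def pvCanon (num : Int) : List String :=
  if h : 0 < num then pvCanon (num / 62) ++ [pvDigit (num % 62)] else []
termination_by num.toNat
decreasing_by omega

-- A-side: the accumulator factors out of A's loop
theorem pvLoopAcc (num : Int) (arr : List String) :
    base62_encode_loop num arr = arr ++ base62_encode_loop num [] := by
  by_cases h : 0 < num
  · rw [base62_encode_loop, dif_pos h]
    conv_rhs => rw [base62_encode_loop, dif_pos h]
    rw [pvLoopAcc (PySem.Int.floordiv num 62), pvLoopAcc (PySem.Int.floordiv num 62) ([] ++ _)]
    simp
  · rw [base62_encode_loop, dif_neg h]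
    conv_rhs => rw [base62_encode_loop, dif_neg h]
    simp
termination_by num.toNat
decreasing_by
  all_goals
    have : PySem.Int.floordiv num 62 = num / 62 := PySem.Int.floordiv_eq_ediv_of_pos (by omega)
    rw [this]; omega

-- A's reversed loop output is the canonical digit list
theorem pvA_eq_canon (num : Int) :
    (base62_encode_loop num []).reverse = pvCanon num := by
  by_cases h : 0 < num
  · rw [base62_encode_loop, dif_pos h, pvLoopAcc, pvCanon, dif_pos h]
    have hd : PySem.Int.floordiv num 62 = num / 62 :=
      PySem.Int.floordiv_eq_ediv_of_pos (by omega)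
    have hm : PySem.Int.mod num 62 = num % 62 :=
      PySem.Int.mod_eq_emod_of_pos (by omega)
    have ih := pvA_eq_canon (PySem.Int.floordiv num 62)
    rw [hd] at ih
    simp [ih]
  · rw [base62_encode_loop, dif_neg h, pvCanon, dif_neg h]
    rfl
termination_by num.toNat
decreasing_by
  have : PySem.Int.floordiv num 62 = num / 62 := PySem.Int.floordiv_eq_ediv_of_pos (by omega)
  rw [this]; omega

-- B-side: the accumulator factors out of the emit loop
theorem pvEmitAcc (num p : Int) (out : List String) :
    pvEmitLoop num p out = out ++ pvEmitLoop num p [] := by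
  by_cases h : 0 < p
  · rw [pvEmitLoop, dif_pos h]
    conv_rhs => rw [pvEmitLoop, dif_pos h]
    rw [pvEmitAcc num (PySem.Int.floordiv p 62), pvEmitAcc num (PySem.Int.floordiv p 62) ([] ++ _)]
    simp
  · rw [pvEmitLoop, dif_neg h]
    conv_rhs => rw [pvEmitLoop, dif_neg h]
    simp
termination_by p.toNat
decreasing_by
  all_goals
    have : PySem.Int.floordiv p 62 = p / 62 := PySem.Int.floordiv_eq_ediv_of_pos (by omega)
    rw [this]; omega

-- one emit step for p = 1 (the last digit)
theorem pvEmitOne (num : Int) :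
    pvEmitLoop num 1 [] = [pvDigit (num % 62)] := by
  rw [pvEmitLoop, dif_pos (by norm_num)]
  have e0 : PySem.Int.floordiv (1 : Int) 62 = 0 := by
    rw [PySem.Int.floordiv_eq_ediv_of_pos (by norm_num)]; decide
  have e1 : PySem.Int.floordiv num 1 = num := by
    rw [PySem.Int.floordiv_eq_ediv_of_pos (by norm_num)]; simp
  have em : PySem.Int.mod num 62 = num % 62 := PySem.Int.mod_eq_emod_of_pos (by norm_num)
  rw [e0, e1, em, pvEmitLoop, dif_neg (by norm_num)]
  simp

-- one emit step for p = 62^(k+1) (the leading digit splits off at the front)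
theorem pvEmitPowSucc (k : Nat) (num : Int) :
    pvEmitLoop num ((62 : Int) ^ (k + 1)) [] =
      pvDigit (num / (62 : Int) ^ (k + 1) % 62) :: pvEmitLoop num ((62 : Int) ^ k) [] := by
  rw [pvEmitLoop, dif_pos (by positivity)]
  have hp : PySem.Int.floordiv ((62 : Int) ^ (k + 1)) 62 = (62 : Int) ^ k := by
    rw [PySem.Int.floordiv_eq_ediv_of_pos (by norm_num), pow_succ]
    exact Int.mul_ediv_cancel _ (by norm_num)
  have hd : PySem.Int.floordiv num ((62 : Int) ^ (k + 1)) = num / (62 : Int) ^ (k + 1) :=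
    PySem.Int.floordiv_eq_ediv_of_pos (by positivity)
  have hm : PySem.Int.mod (num / (62 : Int) ^ (k + 1)) 62 = num / (62 : Int) ^ (k + 1) % 62 :=
    PySem.Int.mod_eq_emod_of_pos (by norm_num)
  rw [hp, hd, hm, pvEmitAcc]
  simp

-- emitting from power 62^(k+1) splits off the last digit of num
theorem pvEmitStep (k : Nat) (num : Int) :
    pvEmitLoop num ((62 : Int) ^ (k + 1)) [] =
      pvEmitLoop (num / 62) ((62 : Int) ^ k) [] ++ [pvDigit (num % 62)] := by
  induction k with
  | zero =>
    rw [pvEmitPowSucc 0 num]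
    have h0 : ((62 : Int) ^ 0) = 1 := pow_zero 62
    have h1 : ((62 : Int) ^ (0 + 1)) = 62 := by norm_num
    rw [h0, h1, pvEmitOne num, pvEmitOne (num / 62)]
    simp
  | succ k ih =>
    rw [pvEmitPowSucc (k + 1) num, pvEmitPowSucc k (num / 62), ih]
    have hdd : num / (62 : Int) ^ (k + 1 + 1) = num / 62 / (62 : Int) ^ (k + 1) := by
      rw [Int.ediv_ediv_of_nonneg (by norm_num : (0:Int) ≤ 62)]
      congr 1
      rw [pow_succ]
      ring
    rw [hdd]
    simp

-- emitting from the bracketing power 62^k (62^k ≤ num < 62^(k+1)) gives the canonical digits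
theorem pvEmitBracket (k : Nat) (num : Int)
    (hlo : (62 : Int) ^ k ≤ num) (hhi : num < (62 : Int) ^ (k + 1)) :
    pvEmitLoop num ((62 : Int) ^ k) [] = pvCanon num := by
  induction k generalizing num with
  | zero =>
    have h1 : (1 : Int) ≤ num := by simpa using hlo
    have h62 : num < 62 := by simpa using hhi
    rw [pow_zero, pvEmitOne num, pvCanon, dif_pos (by omega)]
    have hz : num / 62 = 0 := by omega
    rw [hz, pvCanon, dif_neg (by norm_num)]
    simp
  | succ k ih =>
    rw [pvEmitStep k num, pvCanon, dif_pos (lt_of_lt_of_le (by positivity) hlo)]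
    congr 1
    have hps : ((62 : Int) ^ (k + 1)) = 62 ^ k * 62 := pow_succ 62 k
    have hps2 : ((62 : Int) ^ (k + 1 + 1)) = 62 ^ (k + 1) * 62 := pow_succ 62 (k + 1)
    rw [hps] at hlo
    rw [hps2, hps] at hhi
    exact ih (num / 62) (by omega) (by rw [hps]; omega)

-- the power loop returns the bracketing power of 62
theorem pvPowLoopSpec (num p : Int) (hp : 0 < p) (hle : p ≤ num) :
    ∃ k : Nat, pvPowLoop num p = p * (62 : Int) ^ k ∧
      p * (62 : Int) ^ k ≤ num ∧ num < p * (62 : Int) ^ (k + 1) := by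
  by_cases h : p * 62 ≤ num
  · obtain ⟨k, hk, hk1, hk2⟩ := pvPowLoopSpec num (p * 62) (by omega) h
    refine ⟨k + 1, ?_, ?_, ?_⟩
    · rw [pvPowLoop, dif_pos ⟨hp, h⟩, hk]; ring
    · calc p * 62 ^ (k + 1) = p * 62 * 62 ^ k := by ring
        _ ≤ num := hk1
    · calc num < p * 62 * 62 ^ (k + 1) := hk2
        _ = p * 62 ^ (k + 1 + 1) := by ring
  · refine ⟨0, ?_, by simpa using hle, ?_⟩
    · rw [pvPowLoop, dif_neg (by tauto)]; ring
    · simpa using h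
termination_by (num - p).toNat
decreasing_by omega

-- B equals the canonical digit list
theorem pvB_eq_canon (num : Int) (hnum : 0 ≤ num) :
    base62_encode_alt num = pvCanon num := by
  unfold base62_encode_alt
  by_cases h : num ≤ 0
  · rw [if_pos h, pvCanon, dif_neg (by omega)]
  · rw [if_neg h]
    obtain ⟨k, hk, hk1, hk2⟩ := pvPowLoopSpec num 1 (by norm_num) (by omega)
    rw [hk]
    simp only [one_mul] at *
    exact pvEmitBracket k num hk1 hk2

-- ===== VERDICT (by name: the statement is the Claim_ definition above) =====
theorem base62_encode_spec : Claim_equal_base62_encode := by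
  intro num _ hpre
  unfold Spec_base62_encode base62_encode
  rw [pvA_eq_canon, pvB_eq_canon num hpre]
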